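/- GENERATED by mk_final_copies.py from the proof of the farm's unit `start_decoder.R16d` (farm:start_decoder.R16d.1: Proof.lean) as the
   re-elaboration sweep compiled it — do not edit. -/
import Asan.CheckWalk
import Vorbis.Spec.Reader
import Vorbis.Spec.Units.start_decoder_R16d
import Vorbis.Spec.Worked.start_decoder_R16d_Lemmas

open X86 X86.User Asan Vorbis Vorbis.Spec Vorbis.Spec.StartDecoder

set_option maxRecDepth 4000
set_option maxHeartbeats 16000000

namespace Vorbis.Spec.start_decoder_R16d

/-- **Segment R16d of `start_decoder`** (`cut322` 0x1166f6 … 0x116776; stb_vorbis_fixed.c 4161 – 4163): `f->finalY[i] = rax` (check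
site 0x116705, store8 at `f + 1264 + 8·i`), the joint NULL test of the three pointers of channel `i` (check sites 0x116712,
0x116733: load8 of `channel_buffers[i]`, `previous_window[i]`, all inside `*f`). Three arms lead to `error(f, 3)` at 0x11674d (one
per NULL pointer): each hands the returned state to `err_loop` and `err_jmp` (the `jmp 113b22`, exit `AtERR`). The success arm:
check site 0x11675e (load4 of `blocksize_1`), `memset(channel_buffers[i], 0, 4·blocksize_1)` with `memset_pre`; its returned state
(0x11677b = `cut324`) is handed to `ok_exit` (exit `AtR16d`). ONE walk: the addresses are given to the walker as numbers (`ea1` …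
`ea4`, `hsx`), the two pointer loads as ghost values (`r_cb`, `r_pw`). -/
theorem segR16d_walk {Lay : Layout} (hLay : Lay.hi = 0x1000000) {μ : Microarch} (hμ : UserX.MicroOK μ) {u₀ : State}
    (hcode : HasCodeNat Lay u₀ Vorbis.L.start_decoder.entry Vorbis.Code.code_start_decoder.nat Vorbis.L.start_decoder.size)
    (hload4 : Asan.SmallCheck Lay μ Vorbis.WayInv (Vorbis.CodeOK u₀) [.rax, .rcx, .rdx] 4 Vorbis.L.__asan_load4_noabort.entry)
    (hstore8 : Asan.SmallCheck Lay μ Vorbis.WayInv (Vorbis.CodeOK u₀) [.rax, .rcx, .rdx] 8 Vorbis.L.__asan_store8_noabort.entry)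
    (hload8 : Asan.SmallCheck Lay μ Vorbis.WayInv (Vorbis.CodeOK u₀) [.rax, .rcx, .rdx] 8 Vorbis.L.__asan_load8_noabort.entry)
    (h_error : ∀ (others : List Obj) (frames : List (Nat × FrameLayout)),
      Calls Lay μ Vorbis.WayInv (Vorbis.conv u₀) Vorbis.L.error.entry (Vorbis.Spec.error.spec others frames))
    (h_memset : ∀ (others : List Obj) (frames : List (Nat × FrameLayout)),
      Calls Lay μ Vorbis.WayInv (Vorbis.conv u₀) Vorbis.L.memset.entry (Vorbis.Spec.memset.spec others frames))
    {g : Ghost} {i : Nat} {v : State} {A9 : Arena} {A : Arena × List Obj} (hb : BodyR16c u₀ g i A9 A v) :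
    ReachVia Lay μ WayInv v (fun w => AtR16d u₀ g i w ∨ AtERR u₀ g w) := by
  have hl := hb.loop
  have hpt := hl.secPt
  have hfr := hpt.frame
  have hh := hpt.hand
  have hm := hpt.mid
  have hp : Pos g A := hpt.pos
  have he := hfr.entry
  v_entry he
  obtain ⟨hRa, hR8⟩ := hfr.r_eq
  simp only [steady, Ghost.RA] at hRa
  simp only [depth] at he_room he_stack
  have hflo := hp.f_lo
  have hf2 := hp.f_hi
  have hf3 := hp.f_stack
  simp only [Ghost.RA] at hf3
  have hRn : (addr g.R).toNat = g.R := toNat_addr _ (by omega)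
  have hfn : (addr g.f).toNat = g.f := toNat_addr _ (by omega)
  have hf64 : g.f + 1808 < 2 ^ 64 := by omega
  -- i < channels ≤ 16 (the loop test of R15, HD1)
  have hlt := hb.lt
  have hhd := hm.header.HD1
  have hi16 : i < 16 := by omega
  -- the present state
  have w_rip := hfr.rip
  have c_rsp := hfr.rsp
  have c_rbp := hpt.rbp
  have c_r14 := hl.r14
  have c_rbx := hb.rbx
  have c_r12 := hb.r12
  have c_r13 := hb.r13
  have w_eq : Mem.EqOn Vorbis.L.textLo Vorbis.L.textHi u₀.mem v.mem := hfr.code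
  have hdf : v.flags .df = false := (show abiInv _ from hfr.inv).1
  have hmx : v.mxcsr &&& 0x1F80 = 0x1F80 := (show abiInv _ from hfr.inv).2
  have hsse := Vorbis.sseOK_of_abiInv hfr.inv
  have herr := h_error A.2 g.frames'
  have hms := h_memset A.2 g.frames'
  -- the addresses of the segment as numbers: `movsxd rax, r14d`, the three slots of channel `i`
  have hsx : Word.ofBV (BitVec.signExtend 64 (Word.part .w32 (addr i))) = addr i := cnt32_sext i (by omega)
  have hin : (addr i).toNat = i := toNat_addr _ (by omega)
  have h108 : (addr (i + 108)).toNat = i + 108 := toNat_addr _ (by omega)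
  have ea1 : addr g.f + (addr i + 158) * 8 = addr (g.f + 1264 + 8 * i) := by
    apply eq_addr
    u_omega
  have ea2 : addr g.f + addr (i + 108) * 8 + 8 = addr (g.f + 872 + 8 * i) := by
    apply eq_addr
    u_omega
  have ea3 : addr g.f + addr i * 8 + 1128 = addr (g.f + 1128 + 8 * i) := by
    apply eq_addr
    u_omega
  have ea4 : addr g.f + (addr i + 140) * 8 + 8 = addr (g.f + 1128 + 8 * i) := by
    apply eq_addr
    u_omega
  -- the two pointer loads (0x116717, 0x116738) as the ghost values of the entry assertion
  have r_cb : v.mem.readLE (addr (g.f + 872 + 8 * i)) 8 = stb_vorbis.channel_buffers v.mem g.f i := by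
    simp only [vacc, voff]
    rfl
  have r_pw : v.mem.readLE (addr (g.f + 1128 + 8 * i)) 8 = stb_vorbis.previous_window v.mem g.f i := by
    simp only [vacc, voff]
    rfl
  have hcblt : stb_vorbis.channel_buffers v.mem g.f i < 2 ^ 64 := by
    rw [← r_cb]
    exact Mem.readLE_lt' v.mem _ 8
  u_walk hcode [hμ.vendor, hsx, ea1, ea2, ea3, ea4] until [Vorbis.L.start_decoder.cut324, Vorbis.L.start_decoder.cut4] span [Vorbis.L.textLo, Vorbis.L.textHi] side (v_side)
  case check_116705 =>
    -- 0x116705: the store of `f->finalY[i]` (f + 1264 + 8·i) lies inside `*f`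
    have hun : ShadowUntouched v.mem s_116705.mem := by v_untouched
    rw [Nat.add_assoc]
    exact chk_f hfr hh hun (1264 + 8 * i) 8 (by decide) (by omega) hf64
  case check_116712 =>
    -- 0x116712: the load of `f->channel_buffers[i]` (f + 872 + 8·i)
    have hun : ShadowUntouched v.mem s_116712.mem := by v_untouched
    rw [Nat.add_assoc]
    exact chk_f hfr hh hun (872 + 8 * i) 8 (by decide) (by omega) hf64
  case call_inv => v_inv
  case pre_11674d =>
    -- 0x11674d, arm `channel_buffers[i] == NULL`: `error(f, VORBIS_outofmem)`
    have hun : ShadowUntouched v.mem s_11674d.mem := by v_untouched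
    exact error_pre hfr hh hun (by rw [w_rsp]; u_omega) (by rw [w_rdi]; exact hfn)
  case check_116733 =>
    -- 0x116733: the load of `f->previous_window[i]` (f + 1128 + 8·i)
    have hun : ShadowUntouched v.mem s_116733.mem := by v_untouched
    rw [Nat.add_assoc]
    exact chk_f hfr hh hun (1128 + 8 * i) 8 (by decide) (by omega) hf64
  case call_inv => v_inv
  case pre_11674d =>
    -- 0x11674d, arm `previous_window[i] == NULL`
    have hun : ShadowUntouched v.mem s_11674d.mem := by v_untouched
    exact error_pre hfr hh hun (by rw [w_rsp]; u_omega) (by rw [w_rdi]; exact hfn)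
  case check_11675e =>
    -- 0x11675e: the load of `f->blocksize_1` (f + 156)
    have hun : ShadowUntouched v.mem s_11675e.mem := by v_untouched
    rw [addr_add_lit]
    exact chk_f hfr hh hun 156 4 (by decide) (by omega) hf64
  case call_inv => v_inv
  case pre_116776 =>
    -- 0x116776: `memset(channel_buffers[i], 0, 4·blocksize_1)`: the pointer is not NULL, hence a block since `A9`
    have hun : ShadowUntouched v.mem s_116776.mem := by v_untouched
    have hcb : stb_vorbis.channel_buffers v.mem g.f i ≠ 0 := by
      intro e
      apply hbr_11671f
      rw [e]
      rfl
    have hrdi : (s_116776.reg .rdi).toNat = stb_vorbis.channel_buffers v.mem g.f i := by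
      rw [w_rdi, UInt64.toNat_ofNat']
      exact Nat.mod_eq_of_lt hcblt
    have hrdx : (s_116776.reg .rdx).toNat = 4 * bsize v.mem g.f 1 := by
      rw [w_rdx]
      exact rdx_val hm.header
    exact memset_pre hb hun (by rw [w_rsp]; u_omega) hrdi hrdx hcb
  case call_inv => v_inv
  case pre_11674d =>
    -- 0x11674d, arm `finalY[i] == NULL`
    have hun : ShadowUntouched v.mem s_11674d.mem := by v_untouched
    exact error_pre hfr hh hun (by rw [w_rsp]; u_omega) (by rw [w_rdi]; exact hfn)
  case cont =>
    -- THE FAILURE ARM `channel_buffers[i] == NULL`: the returned state of `error` (0x116752), then `jmp 113b22`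
    have hunA : ShadowUntouched v.mem s_11674d.mem := by v_untouched
    have hsA : Mem.SameExcept (OwnWins g i) v.mem s_11674d.mem := by
      unfold OwnWins
      u_same
    have hspn : (s_11674d.reg .rsp).toNat = g.R - 8 := by
      rw [w_rsp_11674d]
      u_omega
    have hrdi : (s_11674d.reg .rdi).toNat = g.f := by
      rw [w_rdi_11674d]
      exact hfn
    have hloop := err_loop hb hi16 hsA hunA hspn hrdi w_same w_post w_rip w_rsp (Vorbis.conv_code_eqOn w_code) w_inv
      (w_kept.get .rbp rfl) (w_kept.get .r14 rfl)
    exact err_jmp hLay hμ hcode hloop w_post.1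
  case cont =>
    -- THE FAILURE ARM `previous_window[i] == NULL`
    have hunA : ShadowUntouched v.mem s_11674d.mem := by v_untouched
    have hsA : Mem.SameExcept (OwnWins g i) v.mem s_11674d.mem := by
      unfold OwnWins
      u_same
    have hspn : (s_11674d.reg .rsp).toNat = g.R - 8 := by
      rw [w_rsp_11674d]
      u_omega
    have hrdi : (s_11674d.reg .rdi).toNat = g.f := by
      rw [w_rdi_11674d]
      exact hfn
    have hloop := err_loop hb hi16 hsA hunA hspn hrdi w_same w_post w_rip w_rsp (Vorbis.conv_code_eqOn w_code) w_inv
      (w_kept.get .rbp rfl) (w_kept.get .r14 rfl)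
    exact err_jmp hLay hμ hcode hloop w_post.1
  case cont =>
    -- THE SUCCESS ARM: the returned state of memset (0x11677b = cut324)
    have hcb : stb_vorbis.channel_buffers v.mem g.f i ≠ 0 := by
      intro e
      apply hbr_11671f
      rw [e]
      rfl
    have hpw : stb_vorbis.previous_window v.mem g.f i ≠ 0 := by
      intro e
      apply hbr_11673e
      rw [e]
    have hunA : ShadowUntouched v.mem s_116776.mem := by v_untouched
    have hsA : Mem.SameExcept (OwnWins g i) v.mem s_116776.mem := by
      unfold OwnWins
      u_same
    have hfy0 : s_116776.mem.readLE (addr (g.f + 1264 + 8 * i)) 8 = (v.reg .rax).toNat := by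
      rw [w_mem_116776]
      u_read
    have hspn : (s_116776.reg .rsp).toNat = g.R - 8 := by
      rw [w_rsp_116776]
      u_omega
    have hrdi : (s_116776.reg .rdi).toNat = stb_vorbis.channel_buffers v.mem g.f i := by
      rw [w_rdi_116776, UInt64.toNat_ofNat']
      exact Nat.mod_eq_of_lt hcblt
    have hrdx : (s_116776.reg .rdx).toNat = 4 * bsize v.mem g.f 1 := by
      rw [w_rdx_116776]
      exact rdx_val hm.header
    exact ReachVia.done (Or.inl (ok_exit hb hi16 hsA hunA hfy0 hspn hrdi hrdx hcb hpw hbr_116743 w_same w_post w_rip w_rsp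
      (Vorbis.conv_code_eqOn w_code) w_inv (w_kept.get .rbp rfl) (w_kept.get .r14 rfl)))
  case cont =>
    -- THE FAILURE ARM `finalY[i] == NULL`
    have hunA : ShadowUntouched v.mem s_11674d.mem := by v_untouched
    have hsA : Mem.SameExcept (OwnWins g i) v.mem s_11674d.mem := by
      unfold OwnWins
      u_same
    have hspn : (s_11674d.reg .rsp).toNat = g.R - 8 := by
      rw [w_rsp_11674d]
      u_omega
    have hrdi : (s_11674d.reg .rdi).toNat = g.f := by
      rw [w_rdi_11674d]
      exact hfn
    have hloop := err_loop hb hi16 hsA hunA hspn hrdi w_same w_post w_rip w_rsp (Vorbis.conv_code_eqOn w_code) w_inv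
      (w_kept.get .rbp rfl) (w_kept.get .r14 rfl)
    exact err_jmp hLay hμ hcode hloop w_post.1

end Vorbis.Spec.start_decoder_R16d

/-- The unit `start_decoder.R16d`: `segR16d_walk` at every entry state. -/
theorem Vorbis.Spec.Worked.start_decoder_R16d_ok : Vorbis.Spec.start_decoder_R16d.Statement := by
  intro Lay hLay μ hμ u₀ hcode hload4 hstore8 hload8 h_error h_memset g i v hat
  obtain ⟨A9, A, hb⟩ := hat
  exact Vorbis.Spec.start_decoder_R16d.segR16d_walk hLay hμ hcode hload4 hstore8 hload8 h_error h_memset hb
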